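-- pv_equiv track=rewrite | github.com/ynulihao/LLMRouterBench | baselines/aggregators.py | _separate_datasets
-- ===== SOURCE A (Python) =====
-- from typing import Dict, List, Any, Optional, Tuple
--
-- def _separate_datasets(dataset_keys: List[str], ood_datasets: Optional[List[str]] = None) -> Tuple[List[str], List[str]]:
--     """
--     Separate dataset keys into in-distribution and OOD groups.
--
--     Args:
--         dataset_keys: List of dataset keys (e.g., ["aime/hybrid", "brainteaser/test"])
--         ood_datasets: List of OOD dataset IDs to filter
--
--     Returns:
--         Tuple of (in_distribution_keys, ood_keys)
--     """
--     if not ood_datasets: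
--         return sorted(dataset_keys), []
--
--     ood_set = set(ood_datasets)
--     in_dist_keys = []
--     ood_keys = []
--
--     for key in dataset_keys:
--         dataset_id = key.split('/')[0]
--         if dataset_id in ood_set:
--             ood_keys.append(key)
--         else:
--             in_dist_keys.append(key)
--
--     return sorted(in_dist_keys), sorted(ood_keys)
-- ===== SOURCE B (Python) =====
-- from typing import List, Optional, Tuple
--
-- def _separate_datasets(dataset_keys: List[str], ood_datasets: Optional[List[str]] = None) -> Tuple[List[str], List[str]]:
--     # Decorate-sort-split: ONE sort of the whole list under a tag-decorated key
--     # ('0'+key for in-distribution, '1'+key for OOD) puts the in-distribution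
--     # block first and the OOD block second, each internally sorted; a counting
--     # pass gives the split point, and two slices return the halves.
--     ood_set = set(ood_datasets or [])
--
--     def tagged(key: str) -> str:
--         return ('1' if key.split('/')[0] in ood_set else '0') + key
--
--     order = sorted(dataset_keys, key=tagged)
--     cut = sum(1 for key in dataset_keys if key.split('/')[0] not in ood_set)
--     return order[:cut], order[cut:]
-- ===== Notes on version B (the rewrite author's own statement) =====
-- stated objective: alternative
-- what changed: B replaces A's branch-partition-then-two-sorts with a decorate-sort-split scheme: one sort of the whole list under a tag-decorated key ('0'+key for in-distribution, '1'+key for OOD) yields both groups as contiguous blocks, a counting pass finds the split point, and slicing returns the two halves; the empty-OOD fast path disappears.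
import Mathlib
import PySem

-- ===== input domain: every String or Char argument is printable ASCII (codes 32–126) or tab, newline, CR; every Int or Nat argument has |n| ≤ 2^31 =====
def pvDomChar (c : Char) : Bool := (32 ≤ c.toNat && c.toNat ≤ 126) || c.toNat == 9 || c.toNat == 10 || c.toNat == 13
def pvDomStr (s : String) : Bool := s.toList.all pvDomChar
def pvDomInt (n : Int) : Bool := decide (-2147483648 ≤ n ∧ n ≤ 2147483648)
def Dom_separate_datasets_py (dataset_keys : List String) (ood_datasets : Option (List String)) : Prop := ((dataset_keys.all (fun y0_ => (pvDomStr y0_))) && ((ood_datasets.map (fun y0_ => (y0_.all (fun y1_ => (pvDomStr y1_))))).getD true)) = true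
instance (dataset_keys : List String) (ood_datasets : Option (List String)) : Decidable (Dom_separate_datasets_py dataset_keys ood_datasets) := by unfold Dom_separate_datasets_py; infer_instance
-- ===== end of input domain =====

-- ===== PORT A =====
-- B replaces the branch-partition-then-two-sorts by a single tag-decorated sort plus a
-- counting pass and two slices (decorate-sort-split); return values proved equal, no mutation.

-- key.split('/')[0] ('/' is nonempty, so split never returns [] and the index never raises)
def pvPrefix (key : String) : String := PySem.List.pyGetD ((PySem.Str.split? key "/").getD []) 0 ""  -- split? is some: "/" ≠ ""

def separate_datasets_py (dataset_keys : List String) (ood_datasets : Option (List String)) : List String × List String :=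
  -- 'if not ood_datasets' is true for both None and []
  if ood_datasets.getD [] = [] then
    (PySem.List.sorted dataset_keys (fun x => x) false, [])
  else
    let ood_set := PySem.Set.ofList (ood_datasets.getD [])
    let p := dataset_keys.foldl (fun acc key =>
      if PySem.Set.contains ood_set (pvPrefix key) then (acc.1, acc.2 ++ [key])
      else (acc.1 ++ [key], acc.2)) ([], [])
    (PySem.List.sorted p.1 (fun x => x) false, PySem.List.sorted p.2 (fun x => x) false)

-- ===== PORT B =====
-- helper 'tagged' of Source B: '1'+key for OOD keys, '0'+key for in-distribution keys
def pvTagged (ood_set : PySem.Set String) (key : String) : String :=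
  (if PySem.Set.contains ood_set (pvPrefix key) then "1" else "0") ++ key

def separate_datasets_py_alt (dataset_keys : List String) (ood_datasets : Option (List String)) : List String × List String :=
  let ood_set := PySem.Set.ofList (ood_datasets.getD [])
  let order := PySem.List.sorted dataset_keys (pvTagged ood_set) false
  -- sum(1 for key in dataset_keys if key.split('/')[0] not in ood_set)
  let cut : Int := ((dataset_keys.countP (fun key => !PySem.Set.contains ood_set (pvPrefix key)) : Nat) : Int)
  (PySem.List.slice order none (some cut), PySem.List.slice order (some cut) none)

-- ===== PRECONDITION & SPEC =====
def Spec_separate_datasets_py (dataset_keys : List String) (ood_datasets : Option (List String)) (out : List String × List String) : Prop := out = separate_datasets_py_alt dataset_keys ood_datasets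
instance (dataset_keys : List String) (ood_datasets : Option (List String)) (out : List String × List String) : Decidable (Spec_separate_datasets_py dataset_keys ood_datasets out) := by unfold Spec_separate_datasets_py; infer_instance

-- ===== CLAIM (what is proved, stated in full; the proofs are below) =====
def Claim_equal_separate_datasets_py : Prop := ∀ (dataset_keys : List String) (ood_datasets : Option (List String)), Dom_separate_datasets_py dataset_keys ood_datasets → Spec_separate_datasets_py dataset_keys ood_datasets (separate_datasets_py dataset_keys ood_datasets)

-- ===== LEMMAS AND PROOFS =====

-- A's accumulate loop is the two filters of the input list
theorem pv_fold_partition (p : String → Bool) (xs : List String) (a b : List String) :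
    xs.foldl (fun acc key => if p key then (acc.1, acc.2 ++ [key]) else (acc.1 ++ [key], acc.2)) (a, b)
      = (a ++ xs.filter (fun k => !p k), b ++ xs.filter p) := by
  induction xs generalizing a b with
  | nil => simp
  | cons x xs ih =>
    by_cases h : p x <;> simp [List.foldl_cons, h, ih]

-- the tag-decorated key is injective
theorem pv_tag_inj (p : String → Bool) :
    Function.Injective (fun k => (if p k then "1" else "0") ++ k) := by
  intro a b h
  have h' := congrArg String.toList h
  simp only [String.toList_append] at h'
  cases ha : p a <;> cases hb : p b <;> rw [ha, hb] at h' <;> simp at h' <;>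
    exact String.toList_inj.mp h'

-- prepending the same tag character is monotone for the string order
theorem pv_tag_mono (c : Char) (a b : String) (h : a ≤ b) :
    String.ofList (c :: a.toList) ≤ String.ofList (c :: b.toList) := by
  rw [String.le_iff_toList_le, String.toList_ofList, String.toList_ofList]
  exact List.cons_le_cons c (String.le_iff_toList_le.mp h)

-- every '0'-tagged key sorts below every '1'-tagged key
theorem pv_tag_lt (a b : String) : String.ofList ('0' :: a.toList) ≤ String.ofList ('1' :: b.toList) := by
  rw [String.le_iff_toList_le, String.toList_ofList, String.toList_ofList]
  exact le_of_lt (List.Lex.rel (by decide))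

theorem pv_tag_eq (p : String → Bool) (k : String) :
    (if p k then "1" else "0") ++ k = String.ofList ((if p k then '1' else '0') :: k.toList) := by
  apply String.toList_inj.mp
  cases h : p k <;> simp

-- one sort under the tag-decorated key is the two identity-sorted groups, in-distribution block first
theorem pv_sorted_tagged (p : String → Bool) (xs : List String) :
    PySem.List.sorted xs (fun k => (if p k then "1" else "0") ++ k) false
      = PySem.List.sorted (xs.filter (fun k => !p k)) (fun x => x) false
          ++ PySem.List.sorted (xs.filter p) (fun x => x) false := by
  apply PySem.List.eq_of_perm_of_pairwise_le_of_injective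
      (fun k => (if p k then "1" else "0") ++ k) (pv_tag_inj p)
  · have h1 : ((PySem.List.sorted (xs.filter (fun k => !p k)) (fun x => x) false)
        ++ PySem.List.sorted (xs.filter p) (fun x => x) false).Perm
        (xs.filter (fun k => !p k) ++ xs.filter p) :=
      List.Perm.append (PySem.List.sorted_perm _ _ false) (PySem.List.sorted_perm _ _ false)
    have h2 : (xs.filter (fun k => !p k) ++ xs.filter p).Perm xs := by
      simpa using List.filter_append_perm (fun k => !p k) xs
    exact (PySem.List.sorted_perm xs _ false).trans ((h1.trans h2).symm)
  · exact PySem.List.sorted_pairwise xs _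
  · rw [List.pairwise_append]
    refine ⟨?_, ?_, ?_⟩
    · refine (PySem.List.sorted_pairwise _ (fun x => x)).imp_of_mem ?_
      intro a b ha hb hle
      have hpa : p a = false := by
        simpa using (List.mem_filter.mp ((PySem.List.mem_sorted _ _ false a).mp ha)).2
      have hpb : p b = false := by
        simpa using (List.mem_filter.mp ((PySem.List.mem_sorted _ _ false b).mp hb)).2
      rw [pv_tag_eq, pv_tag_eq, hpa, hpb]
      exact pv_tag_mono '0' a b hle
    · refine (PySem.List.sorted_pairwise _ (fun x => x)).imp_of_mem ?_
      intro a b ha hb hle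
      have hpa : p a = true := (List.mem_filter.mp ((PySem.List.mem_sorted _ _ false a).mp ha)).2
      have hpb : p b = true := (List.mem_filter.mp ((PySem.List.mem_sorted _ _ false b).mp hb)).2
      rw [pv_tag_eq, pv_tag_eq, hpa, hpb]
      exact pv_tag_mono '1' a b hle
    · intro a ha b hb
      have hpa : p a = false := by
        simpa using (List.mem_filter.mp ((PySem.List.mem_sorted _ _ false a).mp ha)).2
      have hpb : p b = true := (List.mem_filter.mp ((PySem.List.mem_sorted _ _ false b).mp hb)).2
      rw [pv_tag_eq, pv_tag_eq, hpa, hpb]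
      exact pv_tag_lt a b

-- B computed in closed form: the two identity-sorted filter groups
theorem pv_alt_eq (dataset_keys : List String) (ood_datasets : Option (List String)) :
    separate_datasets_py_alt dataset_keys ood_datasets
      = (PySem.List.sorted (dataset_keys.filter
            (fun k => !PySem.Set.contains (PySem.Set.ofList (ood_datasets.getD [])) (pvPrefix k)))
            (fun x => x) false,
         PySem.List.sorted (dataset_keys.filter
            (fun k => PySem.Set.contains (PySem.Set.ofList (ood_datasets.getD [])) (pvPrefix k)))
            (fun x => x) false) := by
  unfold separate_datasets_py_alt pvTagged
  dsimp only
  rw [pv_sorted_tagged (fun k => PySem.Set.contains (PySem.Set.ofList (ood_datasets.getD [])) (pvPrefix k)) dataset_keys]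
  rw [PySem.List.slice_to_natCast, PySem.List.slice_from_natCast]
  have hlen : (PySem.List.sorted (dataset_keys.filter
      (fun k => !PySem.Set.contains (PySem.Set.ofList (ood_datasets.getD [])) (pvPrefix k)))
      (fun x => x) false).length
      = dataset_keys.countP (fun k => !PySem.Set.contains (PySem.Set.ofList (ood_datasets.getD [])) (pvPrefix k)) := by
    rw [PySem.List.length_sorted, List.countP_eq_length_filter.symm]
  rw [List.take_left' hlen, List.drop_left' hlen]

-- ===== VERDICT (by name: the statement is the Claim_ definition above) =====
theorem separate_datasets_py_spec : Claim_equal_separate_datasets_py := by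
  intro dk od _
  unfold Spec_separate_datasets_py
  rw [pv_alt_eq]
  unfold separate_datasets_py
  by_cases h : od.getD [] = []
  · rw [if_pos h]
    simp [h, PySem.Set.ofList, PySem.Set.contains, PySem.List.sorted_eq_nil_iff]
  · rw [if_neg h]
    simp only [pv_fold_partition, List.nil_append]
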